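-- pv_equiv track=rewrite | github.com/vatsaljain79/btpafterbtp | fingerprint.py | generate_hashes
-- ===== SOURCE A (Python) =====
-- FAN_OUT          = 10            # max pairs per anchor point
--
-- TARGET_T_MIN     = 1             # target zone: min time distance from anchor
--
-- TARGET_T_MAX     = 20            # target zone: max time distance from anchor
--
-- TARGET_F_MIN     = -100          # target zone: freq bin range (relative to anchor)
--
-- TARGET_F_MAX     = 100
--
-- def _make_hash(f1, f2, dt):
--     """Pack (f1, f2, Δt) into a 32-bit integer."""
--     # f1: 10 bits, f2: 10 bits, dt: 12 bits  → 32 bits total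
--     f1  = int(f1)  & 0x3FF          # 10 bits
--     f2  = int(f2)  & 0x3FF          # 10 bits
--     dt  = int(dt)  & 0xFFF          # 12 bits
--     return (f1 << 22) | (f2 << 12) | dt
--
-- def generate_hashes(peaks,
--                     fan_out=FAN_OUT,
--                     t_min=TARGET_T_MIN, t_max=TARGET_T_MAX,
--                     f_min=TARGET_F_MIN, f_max=TARGET_F_MAX):
--     """
--     Given a list of (time_frame, freq_bin) peaks,
--     return a list of (hash32, anchor_time_frame) tuples.
--     """
--     hashes = []
--     n = len(peaks)
--     for i, (t1, f1) in enumerate(peaks):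
--         count = 0
--         for j in range(i + 1, n):
--             t2, f2 = peaks[j]
--             dt = t2 - t1
--             if dt < t_min:
--                 continue
--             if dt > t_max:
--                 break
--             df = f2 - f1
--             if f_min <= df <= f_max:
--                 h = _make_hash(f1, f2, dt)
--                 hashes.append((h, t1))
--                 count += 1
--                 if count >= fan_out:
--                     break
--     return hashes
-- ===== SOURCE B (Python) =====
-- def _make_hash(f1, f2, dt):
--     """Pack (f1, f2, dt) into a 32-bit integer."""
--     return ((int(f1) & 0x3FF) << 22) | ((int(f2) & 0x3FF) << 12) | (int(dt) & 0xFFF)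
--
--
-- def generate_hashes(peaks, fan_out=10, t_min=1, t_max=20, f_min=-100, f_max=100):
--     """Single left-to-right sweep: each peak is first offered as a target to
--     every currently live anchor, then becomes a live anchor itself.  An anchor
--     is retired as soon as a target falls past its time window or its fan-out
--     budget is used up.  Pairs land in per-anchor buckets, concatenated in
--     anchor order at the end."""
--     buckets = [[] for _ in peaks]
--     live = []  # (bucket index, t1, f1, pairs emitted so far)
--     for j, (t2, f2) in enumerate(peaks):
--         survivors = []
--         for (i, t1, f1, c) in live:
--             dt = t2 - t1
--             if dt < t_min:
--                 survivors.append((i, t1, f1, c))      # not yet in the window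
--             elif dt > t_max:
--                 pass                                  # window over: retire
--             elif f_min <= f2 - f1 <= f_max:
--                 buckets[i].append((_make_hash(f1, f2, dt), t1))
--                 if c + 1 < fan_out:
--                     survivors.append((i, t1, f1, c + 1))
--             else:
--                 survivors.append((i, t1, f1, c))
--         survivors.append((j, t2, f2, 0))
--         live = survivors
--     return [h for b in buckets for h in b]
-- ===== Notes on version B (the rewrite author's own statement) =====
-- stated objective: alternative
-- what changed: Replaced A's anchor-major nested scans (for each anchor, re-scan the following peaks with continue/break and a count) by a single target-major sweep: each peak is offered once to a maintained list of live anchors (retired when the time window is passed or the fan-out budget fills), pairs are collected in per-anchor buckets and concatenated in anchor order.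
import Mathlib
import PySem

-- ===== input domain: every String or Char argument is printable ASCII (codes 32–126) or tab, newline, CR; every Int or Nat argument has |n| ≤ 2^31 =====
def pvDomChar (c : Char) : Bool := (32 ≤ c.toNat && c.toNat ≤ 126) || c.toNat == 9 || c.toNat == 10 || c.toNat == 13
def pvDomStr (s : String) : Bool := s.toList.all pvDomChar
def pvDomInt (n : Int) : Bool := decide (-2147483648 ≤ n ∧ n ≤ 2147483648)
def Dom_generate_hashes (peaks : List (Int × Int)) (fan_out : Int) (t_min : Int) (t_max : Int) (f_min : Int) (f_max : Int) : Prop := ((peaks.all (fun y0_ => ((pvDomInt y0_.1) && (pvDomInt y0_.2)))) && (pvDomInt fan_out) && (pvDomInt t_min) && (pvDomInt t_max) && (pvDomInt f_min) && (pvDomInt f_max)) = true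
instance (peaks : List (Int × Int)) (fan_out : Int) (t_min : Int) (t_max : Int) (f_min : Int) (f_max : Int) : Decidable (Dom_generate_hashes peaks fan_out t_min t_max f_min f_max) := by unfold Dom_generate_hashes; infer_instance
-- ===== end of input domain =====

-- B replaces A's anchor-major rescans by a single target-major sweep holding a live-anchor
-- list and per-anchor buckets (objective: alternative traversal, same cost).

-- ===== PORT A =====
-- _make_hash: (int(f1) & 0x3FF) << 22 | (int(f2) & 0x3FF) << 12 | (int(dt) & 0xFFF)
def makeHashA (f1 f2 dt : Int) : Int :=
  PySem.Int.bor (PySem.Int.bor (PySem.Int.band f1 0x3FF <<< 22) (PySem.Int.band f2 0x3FF <<< 12)) (PySem.Int.band dt 0xFFF)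

-- inner 'for j in range(i+1, n)' loop of A, recursing over the suffix peaks[i+1:] with the count accumulator
def innerA (t1 f1 fan_out t_min t_max f_min f_max : Int) : List (Int × Int) → Int → List (Int × Int)
  | [], _ => []
  | (t2, f2) :: rest, count =>
    let dt := t2 - t1
    if dt < t_min then innerA t1 f1 fan_out t_min t_max f_min f_max rest count     -- continue
    else if dt > t_max then []                                                     -- break
    else
      let df := f2 - f1
      if f_min ≤ df ∧ df ≤ f_max then
        let h := makeHashA f1 f2 dt
        if count + 1 ≥ fan_out then [(h, t1)]                                      -- append, then break
        else (h, t1) :: innerA t1 f1 fan_out t_min t_max f_min f_max rest (count + 1)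
      else innerA t1 f1 fan_out t_min t_max f_min f_max rest count

-- outer 'for i, (t1, f1) in enumerate(peaks)' loop; hashes accumulates across anchors
def outerA (fan_out t_min t_max f_min f_max : Int) : List (Int × Int) → List (Int × Int)
  | [] => []
  | (t1, f1) :: rest => innerA t1 f1 fan_out t_min t_max f_min f_max rest 0 ++ outerA fan_out t_min t_max f_min f_max rest

def generate_hashes (peaks : List (Int × Int)) (fan_out : Int) (t_min : Int) (t_max : Int) (f_min : Int) (f_max : Int) : List (Int × Int) :=
  outerA fan_out t_min t_max f_min f_max peaks

-- ===== PORT B =====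
-- Source B's _make_hash
def makeHashB (f1 f2 dt : Int) : Int :=
  PySem.Int.bor (PySem.Int.bor (PySem.Int.band f1 0x3FF <<< 22) (PySem.Int.band f2 0x3FF <<< 12)) (PySem.Int.band dt 0xFFF)

-- Source B's inner 'for (i, t1, f1, c) in live' loop body: state = (survivors, buckets), entry = (i, t1, f1, c)
def stepB (fan_out t_min t_max f_min f_max t2 f2 : Int)
    (st : List (Nat × Int × Int × Int) × List (List (Int × Int))) (e : Nat × Int × Int × Int) :
    List (Nat × Int × Int × Int) × List (List (Int × Int)) :=
  let dt := t2 - e.2.1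
  if dt < t_min then (st.1 ++ [e], st.2)                                           -- not yet in the window
  else if dt > t_max then st                                                       -- window over: retire
  else if f_min ≤ f2 - e.2.2.1 ∧ f2 - e.2.2.1 ≤ f_max then
    let B := st.2.modify e.1 (· ++ [(makeHashB e.2.2.1 f2 dt, e.2.1)])             -- buckets[i].append(...)
    if e.2.2.2 + 1 < fan_out then (st.1 ++ [(e.1, e.2.1, e.2.2.1, e.2.2.2 + 1)], B)
    else (st.1, B)                                                                 -- budget used up: retire
  else (st.1 ++ [e], st.2)

-- Source B's outer 'for j, (t2, f2) in enumerate(peaks)' sweep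
def sweepB (fan_out t_min t_max f_min f_max : Int) :
    List (Int × Int) → Nat → List (Nat × Int × Int × Int) → List (List (Int × Int)) → List (List (Int × Int))
  | [], _, _, B => B
  | (t2, f2) :: rest, j, live, B =>
    let st := live.foldl (stepB fan_out t_min t_max f_min f_max t2 f2) ([], B)
    sweepB fan_out t_min t_max f_min f_max rest (j + 1) (st.1 ++ [(j, t2, f2, 0)]) st.2

def generate_hashes_alt (peaks : List (Int × Int)) (fan_out : Int) (t_min : Int) (t_max : Int) (f_min : Int) (f_max : Int) : List (Int × Int) :=
  (sweepB fan_out t_min t_max f_min f_max peaks 0 [] (peaks.map (fun _ => []))).flatten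

-- ===== PRECONDITION & SPEC =====
def Spec_generate_hashes (peaks : List (Int × Int)) (fan_out : Int) (t_min : Int) (t_max : Int) (f_min : Int) (f_max : Int) (out : List (Int × Int)) : Prop := out = generate_hashes_alt peaks fan_out t_min t_max f_min f_max
instance (peaks : List (Int × Int)) (fan_out : Int) (t_min : Int) (t_max : Int) (f_min : Int) (f_max : Int) (out : List (Int × Int)) : Decidable (Spec_generate_hashes peaks fan_out t_min t_max f_min f_max out) := by unfold Spec_generate_hashes; infer_instance

-- ===== CLAIM (what is proved, stated in full; the proofs are below) =====
def Claim_equal_generate_hashes : Prop := ∀ (peaks : List (Int × Int)) (fan_out : Int) (t_min : Int) (t_max : Int) (f_min : Int) (f_max : Int), Dom_generate_hashes peaks fan_out t_min t_max f_min f_max → Spec_generate_hashes peaks fan_out t_min t_max f_min f_max (generate_hashes peaks fan_out t_min t_max f_min f_max)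

-- ===== LEMMAS AND PROOFS =====

-- survivor-delta of one stepB application (depends only on the entry)
def fB (fan_out t_min t_max f_min f_max t2 f2 : Int) (e : Nat × Int × Int × Int) : List (Nat × Int × Int × Int) :=
  let dt := t2 - e.2.1
  if dt < t_min then [e]
  else if dt > t_max then []
  else if f_min ≤ f2 - e.2.2.1 ∧ f2 - e.2.2.1 ≤ f_max then
    (if e.2.2.2 + 1 < fan_out then [(e.1, e.2.1, e.2.2.1, e.2.2.2 + 1)] else [])
  else [e]

-- bucket-delta of one stepB application
def gB (fan_out t_min t_max f_min f_max t2 f2 : Int) (B : List (List (Int × Int))) (e : Nat × Int × Int × Int) : List (List (Int × Int)) :=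
  let dt := t2 - e.2.1
  if dt < t_min then B
  else if dt > t_max then B
  else if f_min ≤ f2 - e.2.2.1 ∧ f2 - e.2.2.1 ≤ f_max then B.modify e.1 (· ++ [(makeHashB e.2.2.1 f2 dt, e.2.1)])
  else B

-- append a trace to the bucket at an index
def applyTr (B : List (List (Int × Int))) (p : Nat × List (Int × Int)) : List (List (Int × Int)) :=
  B.modify p.1 (· ++ p.2)

def applyAll (B : List (List (Int × Int))) (l : List (Nat × List (Int × Int))) : List (List (Int × Int)) :=
  l.foldl applyTr B

-- the total trace an anchor entry emits over a stream = A's inner loop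
def trc (fan_out t_min t_max f_min f_max : Int) (s : List (Int × Int)) (e : Nat × Int × Int × Int) : Nat × List (Int × Int) :=
  (e.1, innerA e.2.1 e.2.2.1 fan_out t_min t_max f_min f_max s e.2.2.2)

-- traces of the anchors spawned along the stream, with their bucket indices
def spn (fan_out t_min t_max f_min f_max : Int) : List (Int × Int) → Nat → List (Nat × List (Int × Int))
  | [], _ => []
  | (t, f) :: rest, j => (j, innerA t f fan_out t_min t_max f_min f_max rest 0) :: spn fan_out t_min t_max f_min f_max rest (j + 1)

theorem modify_append_nil (B : List (List (Int × Int))) (i : Nat) :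
    B.modify i (· ++ ([] : List (Int × Int))) = B := by
  apply List.ext_getElem?
  intro j
  cases h : B[j]? <;> simp [List.getElem?_modify, h]

theorem modify_modify_same (B : List (List (Int × Int))) (i : Nat) (a b : List (Int × Int)) :
    (B.modify i (· ++ a)).modify i (· ++ b) = B.modify i (· ++ (a ++ b)) := by
  apply List.ext_getElem?
  intro j
  cases h : B[j]? <;> simp [List.getElem?_modify, h]
  by_cases hij : i = j <;> simp [hij]

theorem modify_comm (B : List (List (Int × Int))) {i i' : Nat} (f g : List (Int × Int) → List (Int × Int))
    (h : i ≠ i') : (B.modify i f).modify i' g = (B.modify i' g).modify i f := by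
  apply List.ext_getElem?
  intro j
  simp [List.getElem?_modify]
  cases B[j]? with
  | none => rfl
  | some x =>
    by_cases h1 : i = j <;> by_cases h2 : i' = j <;> simp [h1, h2] <;> omega

theorem stepB_eq (fan_out t_min t_max f_min f_max t2 f2 : Int)
    (st : List (Nat × Int × Int × Int) × List (List (Int × Int))) (e : Nat × Int × Int × Int) :
    stepB fan_out t_min t_max f_min f_max t2 f2 st e =
      (st.1 ++ fB fan_out t_min t_max f_min f_max t2 f2 e, gB fan_out t_min t_max f_min f_max t2 f2 st.2 e) := by
  obtain ⟨i, t1, f1, c⟩ := e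
  obtain ⟨nxt, B⟩ := st
  simp only [stepB, fB, gB]
  by_cases h1 : t2 - t1 < t_min
  · simp [h1]
  · by_cases h2 : t2 - t1 > t_max
    · simp [h1, h2]
    · by_cases h3 : f_min ≤ f2 - f1 ∧ f2 - f1 ≤ f_max
      · have h3' : f_min ≤ f2 - f1 ∧ f2 ≤ f_max + f1 := ⟨h3.1, by omega⟩
        by_cases h4 : c + 1 < fan_out <;> simp [h1, h2, h3', h4]
      · have h3' : ¬ (f_min ≤ f2 - f1 ∧ f2 ≤ f_max + f1) := fun hc => h3 ⟨hc.1, by omega⟩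
        simp [h1, h2, h3']

theorem foldl_stepB (fan_out t_min t_max f_min f_max t2 f2 : Int) :
    ∀ (live : List (Nat × Int × Int × Int)) (acc : List (Nat × Int × Int × Int)) (B : List (List (Int × Int))),
      live.foldl (stepB fan_out t_min t_max f_min f_max t2 f2) (acc, B) =
        (acc ++ live.flatMap (fB fan_out t_min t_max f_min f_max t2 f2),
         live.foldl (gB fan_out t_min t_max f_min f_max t2 f2) B) := by
  intro live
  induction live with
  | nil => intro acc B; simp
  | cons e es ih =>
    intro acc B
    simp only [List.foldl_cons, stepB_eq, ih, List.flatMap_cons, List.append_assoc]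

-- fB either retires the entry or keeps it with the same bucket index
theorem fB_cases (fan_out t_min t_max f_min f_max t2 f2 : Int) (e : Nat × Int × Int × Int) :
    fB fan_out t_min t_max f_min f_max t2 f2 e = [] ∨
      ∃ v : Int × Int × Int, fB fan_out t_min t_max f_min f_max t2 f2 e = [(e.1, v)] := by
  obtain ⟨i, t1, f1, c⟩ := e
  simp only [fB]
  by_cases h1 : t2 - t1 < t_min
  · exact Or.inr ⟨(t1, f1, c), by simp [h1]⟩
  · by_cases h2 : t2 - t1 > t_max
    · exact Or.inl (by simp [h1, h2])
    · by_cases h3 : f_min ≤ f2 - f1 ∧ f2 - f1 ≤ f_max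
      · have h3' : f_min ≤ f2 - f1 ∧ f2 ≤ f_max + f1 := ⟨h3.1, by omega⟩
        by_cases h4 : c + 1 < fan_out
        · exact Or.inr ⟨(t1, f1, c + 1), by simp [h1, h2, h3', h4]⟩
        · exact Or.inl (by simp [h1, h2, h3', h4])
      · have h3' : ¬ (f_min ≤ f2 - f1 ∧ f2 ≤ f_max + f1) := fun hc => h3 ⟨hc.1, by omega⟩
        exact Or.inr ⟨(t1, f1, c), by simp [h1, h2, h3']⟩

theorem modify_id_fun (B : List (List (Int × Int))) (i : Nat) :
    B.modify i (fun x => x) = B := by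
  apply List.ext_getElem?
  intro j
  cases h : B[j]? <;> simp [List.getElem?_modify, h]

-- the bucket update of gB, as a function of the entry alone
def gBf (fan_out t_min t_max f_min f_max t2 f2 : Int) (e : Nat × Int × Int × Int) :
    List (Int × Int) → List (Int × Int) :=
  let dt := t2 - e.2.1
  if dt < t_min then (fun x => x)
  else if dt > t_max then (fun x => x)
  else if f_min ≤ f2 - e.2.2.1 ∧ f2 - e.2.2.1 ≤ f_max then (· ++ [(makeHashB e.2.2.1 f2 dt, e.2.1)])
  else (fun x => x)

theorem gB_eq_modify (fan_out t_min t_max f_min f_max t2 f2 : Int)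
    (B : List (List (Int × Int))) (e : Nat × Int × Int × Int) :
    gB fan_out t_min t_max f_min f_max t2 f2 B e =
      B.modify e.1 (gBf fan_out t_min t_max f_min f_max t2 f2 e) := by
  obtain ⟨i, t1, f1, c⟩ := e
  simp only [gB, gBf]
  by_cases h1 : t2 - t1 < t_min
  · rw [if_pos h1, if_pos h1, modify_id_fun]
  · by_cases h2 : t2 - t1 > t_max
    · rw [if_neg h1, if_neg h1, if_pos h2, if_pos h2, modify_id_fun]
    · by_cases h3 : f_min ≤ f2 - f1 ∧ f2 - f1 ≤ f_max
      · rw [if_neg h1, if_neg h1, if_neg h2, if_neg h2, if_pos h3, if_pos h3]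
      · rw [if_neg h1, if_neg h1, if_neg h2, if_neg h2, if_neg h3, if_neg h3, modify_id_fun]

theorem gB_applyTr_comm (fan_out t_min t_max f_min f_max t2 f2 : Int)
    (C : List (List (Int × Int))) (p : Nat × List (Int × Int)) (e : Nat × Int × Int × Int)
    (h : p.1 ≠ e.1) :
    gB fan_out t_min t_max f_min f_max t2 f2 (applyTr C p) e =
      applyTr (gB fan_out t_min t_max f_min f_max t2 f2 C e) p := by
  rw [gB_eq_modify, gB_eq_modify]
  exact modify_comm C _ _ h

theorem foldl_gB_applyTr (fan_out t_min t_max f_min f_max t2 f2 : Int) :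
    ∀ (es : List (Nat × Int × Int × Int)) (C : List (List (Int × Int))) (p : Nat × List (Int × Int)),
      (∀ e ∈ es, p.1 ≠ e.1) →
      es.foldl (gB fan_out t_min t_max f_min f_max t2 f2) (applyTr C p) =
        applyTr (es.foldl (gB fan_out t_min t_max f_min f_max t2 f2) C) p := by
  intro es
  induction es with
  | nil => intro C p _; rfl
  | cons e es ih =>
    intro C p h
    simp only [List.foldl_cons]
    rw [gB_applyTr_comm _ _ _ _ _ _ _ _ _ _ (h e (by simp))]
    exact ih _ _ (fun e' he' => h e' (by simp [he']))

theorem applyAll_foldl_gB_comm (fan_out t_min t_max f_min f_max t2 f2 : Int) :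
    ∀ (L : List (Nat × List (Int × Int))) (es : List (Nat × Int × Int × Int)) (C : List (List (Int × Int))),
      (∀ p ∈ L, ∀ e ∈ es, p.1 ≠ e.1) →
      applyAll (es.foldl (gB fan_out t_min t_max f_min f_max t2 f2) C) L =
        es.foldl (gB fan_out t_min t_max f_min f_max t2 f2) (applyAll C L) := by
  intro L
  induction L with
  | nil => intro es C _; rfl
  | cons p L ih =>
    intro es C h
    show applyAll (applyTr (es.foldl _ C) p) L = es.foldl _ (applyAll (applyTr C p) L)
    rw [← foldl_gB_applyTr _ _ _ _ _ _ _ es C p (h p (by simp))]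
    exact ih es _ (fun p' hp' => h p' (by simp [hp']))

-- one sweep step of a single entry accounts for exactly the head of its inner-loop trace
theorem entry_step (fan_out t_min t_max f_min f_max t2 f2 : Int)
    (B : List (List (Int × Int))) (rest : List (Int × Int)) (e : Nat × Int × Int × Int) :
    applyAll (gB fan_out t_min t_max f_min f_max t2 f2 B e)
        ((fB fan_out t_min t_max f_min f_max t2 f2 e).map (trc fan_out t_min t_max f_min f_max rest)) =
      applyTr B (trc fan_out t_min t_max f_min f_max ((t2, f2) :: rest) e) := by
  obtain ⟨i, t1, f1, c⟩ := e
  simp only [fB, gB, trc, innerA]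
  by_cases h1 : t2 - t1 < t_min
  · simp [h1, applyAll, applyTr, trc]
  · by_cases h2 : t2 - t1 > t_max
    · simp [h1, h2, applyAll, applyTr, modify_id_fun]
    · by_cases h3 : f_min ≤ f2 - f1 ∧ f2 - f1 ≤ f_max
      · have ha := h3.1
        have hb := h3.2
        by_cases h4 : c + 1 < fan_out
        · have h5 : ¬ fan_out ≤ c + 1 := by omega
          simp [h1, h2, ha, hb, h4, h5, applyAll, applyTr, trc,
            modify_modify_same, makeHashA, makeHashB]
        · have h5 : fan_out ≤ c + 1 := by omega
          simp [h1, h2, ha, hb, h4, h5, applyAll, applyTr,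
            makeHashA, makeHashB]
      · have h3' : ¬ (f_min ≤ f2 - f1 ∧ f2 ≤ f_max + f1) := fun hc => h3 ⟨hc.1, by omega⟩
        simp [h1, h2, h3', applyAll, applyTr, trc]

-- one sweep step of the whole live list, given distinct bucket indices
theorem many_step (fan_out t_min t_max f_min f_max t2 f2 : Int) (rest : List (Int × Int)) :
    ∀ (es : List (Nat × Int × Int × Int)) (B : List (List (Int × Int))),
      (es.map Prod.fst).Nodup →
      applyAll (es.foldl (gB fan_out t_min t_max f_min f_max t2 f2) B)
          ((es.flatMap (fB fan_out t_min t_max f_min f_max t2 f2)).map (trc fan_out t_min t_max f_min f_max rest)) =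
        applyAll B (es.map (trc fan_out t_min t_max f_min f_max ((t2, f2) :: rest))) := by
  intro es
  induction es with
  | nil => intro B _; rfl
  | cons e es ih =>
    intro B hnd
    simp only [List.map_cons, List.nodup_cons] at hnd
    obtain ⟨hni, hnd⟩ := hnd
    simp only [List.foldl_cons, List.flatMap_cons, List.map_append]
    rw [applyAll, List.foldl_append]
    show applyAll (applyAll (es.foldl _ (gB fan_out t_min t_max f_min f_max t2 f2 B e))
        ((fB fan_out t_min t_max f_min f_max t2 f2 e).map (trc fan_out t_min t_max f_min f_max rest)))
        ((es.flatMap _).map _) = _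
    rw [applyAll_foldl_gB_comm fan_out t_min t_max f_min f_max t2 f2 _ es _ ?hdisj]
    · rw [entry_step]
      rw [ih _ hnd]
      rfl
    case hdisj =>
      intro p hp e' he'
      rcases fB_cases fan_out t_min t_max f_min f_max t2 f2 e with hc | ⟨v, hc⟩
      · rw [hc] at hp; simp at hp
      · rw [hc] at hp
        simp only [List.map_cons, List.map_nil, List.mem_singleton] at hp
        subst hp
        simp only [trc]
        intro hcontra
        exact hni (hcontra ▸ List.mem_map_of_mem he')

-- every survivor keeps its original bucket index
theorem fB_idx_sublist (fan_out t_min t_max f_min f_max t2 f2 : Int) :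
    ∀ (l : List (Nat × Int × Int × Int)),
      ((l.flatMap (fB fan_out t_min t_max f_min f_max t2 f2)).map Prod.fst).Sublist (l.map Prod.fst) := by
  intro l
  induction l with
  | nil => simp
  | cons e es ih =>
    simp only [List.flatMap_cons, List.map_append, List.map_cons]
    rcases fB_cases fan_out t_min t_max f_min f_max t2 f2 e with hc | ⟨v, hc⟩
    · rw [hc]; simp only [List.map_nil, List.nil_append]
      exact ih.cons _
    · rw [hc]; simp only [List.map_cons, List.map_nil, List.singleton_append]
      exact ih.cons₂ _

theorem applyAll_trc_nil (fan_out t_min t_max f_min f_max : Int) :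
    ∀ (l : List (Nat × Int × Int × Int)) (B : List (List (Int × Int))),
      applyAll B (l.map (trc fan_out t_min t_max f_min f_max [])) = B := by
  intro l
  induction l with
  | nil => intro B; rfl
  | cons e es ih =>
    intro B
    simp only [List.map_cons, applyAll, List.foldl_cons]
    rw [show applyTr B (trc fan_out t_min t_max f_min f_max [] e) = B from by
      obtain ⟨i, t1, f1, c⟩ := e
      exact modify_append_nil B i]
    exact ih B

-- the sweep = each live anchor's inner-loop trace, then the spawned anchors' traces
theorem sweepB_eq (fan_out t_min t_max f_min f_max : Int) :
    ∀ (s : List (Int × Int)) (j : Nat) (live : List (Nat × Int × Int × Int)) (B : List (List (Int × Int))),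
      (∀ e ∈ live, e.1 < j) → (live.map Prod.fst).Nodup →
      sweepB fan_out t_min t_max f_min f_max s j live B =
        applyAll B (live.map (trc fan_out t_min t_max f_min f_max s) ++ spn fan_out t_min t_max f_min f_max s j) := by
  intro s
  induction s with
  | nil =>
    intro j live B _ _
    simp only [sweepB, spn, List.append_nil]
    exact (applyAll_trc_nil fan_out t_min t_max f_min f_max live B).symm
  | cons p rest ih =>
    obtain ⟨t2, f2⟩ := p
    intro j live B hlt hnd
    show sweepB fan_out t_min t_max f_min f_max ((t2, f2) :: rest) j live B = _
    rw [sweepB, foldl_stepB]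
    simp only [List.nil_append]
    rw [ih (j + 1) _ _ ?hlt' ?hnd']
    · rw [List.map_append]
      simp only [List.map_cons, List.map_nil, trc, spn]
      simp only [applyAll, List.foldl_append, List.foldl_cons, List.foldl_nil]
      congr 2
      exact many_step fan_out t_min t_max f_min f_max t2 f2 rest live B hnd
    case hlt' =>
      intro e he
      rcases List.mem_append.mp he with h | h
      · have : e.1 ∈ (live.flatMap (fB fan_out t_min t_max f_min f_max t2 f2)).map Prod.fst :=
          List.mem_map_of_mem h
        have : e.1 ∈ live.map Prod.fst :=
          (fB_idx_sublist fan_out t_min t_max f_min f_max t2 f2 live).mem this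
        obtain ⟨e', he', heq⟩ := List.mem_map.mp this
        have := hlt e' he'
        omega
      · simp only [List.mem_singleton] at h
        subst h
        simp
    case hnd' =>
      rw [List.map_append]
      apply List.Nodup.append
      · exact (fB_idx_sublist fan_out t_min t_max f_min f_max t2 f2 live).nodup hnd
      · simp
      · intro a ha hb
        have : a ∈ live.map Prod.fst :=
          (fB_idx_sublist fan_out t_min t_max f_min f_max t2 f2 live).mem ha
        obtain ⟨e', he', heq⟩ := List.mem_map.mp this
        have := hlt e' he'
        simp only [List.map_cons, List.map_nil, List.mem_singleton] at hb
        omega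

-- the bucket at index pre.length gets exactly the spawned anchor's trace
theorem modify_append_middle (x : List (Int × Int)) (l : List (List (Int × Int)))
    (f : List (Int × Int) → List (Int × Int)) :
    ∀ (pre : List (List (Int × Int))), (pre ++ x :: l).modify pre.length f = pre ++ f x :: l := by
  intro pre
  induction pre with
  | nil => rfl
  | cons a pre ih => simpa [List.modify_cons] using ih

-- flattening the buckets after applying the spawned traces = A's outer loop
theorem flatten_spn (fan_out t_min t_max f_min f_max : Int) :
    ∀ (s : List (Int × Int)) (pre : List (List (Int × Int))),
      (applyAll (pre ++ s.map (fun _ => []))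
        (spn fan_out t_min t_max f_min f_max s pre.length)).flatten =
      pre.flatten ++ outerA fan_out t_min t_max f_min f_max s := by
  intro s
  induction s with
  | nil => intro pre; simp [spn, applyAll, outerA]
  | cons p rest ih =>
    obtain ⟨t, f⟩ := p
    intro pre
    simp only [spn, List.map_cons, applyAll, List.foldl_cons]
    rw [show applyTr (pre ++ [] :: rest.map (fun _ => []))
          (pre.length, innerA t f fan_out t_min t_max f_min f_max rest 0) =
        (pre ++ [innerA t f fan_out t_min t_max f_min f_max rest 0]) ++ rest.map (fun _ => []) by
      simp [applyTr, modify_append_middle]]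
    rw [show pre.length + 1 = (pre ++ [innerA t f fan_out t_min t_max f_min f_max rest 0]).length by simp]
    have := ih (pre ++ [innerA t f fan_out t_min t_max f_min f_max rest 0])
    simp only [applyAll] at this
    rw [this]
    simp [outerA]

-- ===== VERDICT (by name: the statement is the Claim_ definition above) =====
theorem generate_hashes_spec : Claim_equal_generate_hashes := by
  intro peaks fan_out t_min t_max f_min f_max _
  unfold Spec_generate_hashes generate_hashes generate_hashes_alt
  rw [sweepB_eq fan_out t_min t_max f_min f_max peaks 0 [] _ (by simp) (by simp)]
  have := flatten_spn fan_out t_min t_max f_min f_max peaks []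
  simpa using this.symm
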